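-- pv_equiv track=rewrite | github.com/fontesmidias/tupa | apps/accounts/middleware.py | _is_bypass
-- ===== SOURCE A (Python) =====
-- _MFA_BYPASS_PATHS = (
--     "/auth/",
--     "/admin/",
--     "/static/",
--     "/media/",
--     "/conta/seguranca/mfa/",
--     "/healthz",
--     "/readyz",
--     "/metrics",
-- )
--
-- def _is_bypass(path: str) -> bool:
--     for entry in _MFA_BYPASS_PATHS:
--         if entry.endswith("/"):
--             if path.startswith(entry):
--                 return True
--         elif path == entry:
--             return True
--     return False
-- ===== SOURCE B (Python) =====
-- _PREFIX_SEGS = {"auth", "admin", "static", "media"}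
-- _EXACT = {"healthz", "readyz", "metrics"}
-- _MFA_PREFIX = "/conta/seguranca/mfa/"
--
-- def _is_bypass(path: str) -> bool:
--     if not path.startswith("/"):
--         return False
--     i = path.find("/", 1)
--     if i == -1:
--         return path[1:] in _EXACT
--     return path[1:i] in _PREFIX_SEGS or path.startswith(_MFA_PREFIX)
-- ===== Notes on version B (the rewrite author's own statement) =====
-- stated objective: alternative
-- what changed: Instead of scanning the pattern tuple and branching per entry, B extracts the first path segment once (find the next '/' and slice) and decides by set membership of that segment (prefix-segment set or exact-segment set), plus one startswith for the lone deep prefix.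
import Mathlib
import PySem

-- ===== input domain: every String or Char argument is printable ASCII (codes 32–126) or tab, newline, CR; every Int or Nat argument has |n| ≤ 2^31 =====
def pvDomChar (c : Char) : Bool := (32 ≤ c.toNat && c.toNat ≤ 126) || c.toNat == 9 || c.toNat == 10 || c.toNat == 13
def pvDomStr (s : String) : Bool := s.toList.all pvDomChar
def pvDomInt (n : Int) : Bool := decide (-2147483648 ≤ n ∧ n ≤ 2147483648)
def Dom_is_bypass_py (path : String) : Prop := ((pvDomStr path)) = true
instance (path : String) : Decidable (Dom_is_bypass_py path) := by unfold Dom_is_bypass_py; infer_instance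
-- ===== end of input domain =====

-- B replaces A's scan over the pattern tuple by extracting the FIRST PATH SEGMENT
-- (via find/slice) and deciding by set membership on that segment (alternative algorithm).

-- ===== PORT A =====
def pvMfaBypassPaths : List String :=
  ["/auth/", "/admin/", "/static/", "/media/", "/conta/seguranca/mfa/",
   "/healthz", "/readyz", "/metrics"]

def pvALoop (path : String) : List String → Bool
  | [] => false
  | entry :: rest =>
    if PySem.Str.endswith entry "/" then
      if PySem.Str.startswith path entry then true else pvALoop path rest
    else if path == entry then true else pvALoop path rest

def is_bypass_py (path : String) : Bool := pvALoop path pvMfaBypassPaths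

-- ===== PORT B =====
def pvPrefixSegs : PySem.Set String := PySem.Set.ofList ["auth", "admin", "static", "media"]
def pvExactSegs : PySem.Set String := PySem.Set.ofList ["healthz", "readyz", "metrics"]
def pvMfaPrefix : String := "/conta/seguranca/mfa/"

def is_bypass_py_alt (path : String) : Bool :=
  if !PySem.Str.startswith path "/" then false
  else
    let i := PySem.Str.findFrom path "/" 1
    if i == -1 then PySem.Set.contains pvExactSegs (PySem.Str.slice path (some 1) none)
    else PySem.Set.contains pvPrefixSegs (PySem.Str.slice path (some 1) (some i))
         || PySem.Str.startswith path pvMfaPrefix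

-- ===== PRECONDITION & SPEC =====
def Spec_is_bypass_py (path : String) (out : Bool) : Prop := out = is_bypass_py_alt path
instance (path : String) (out : Bool) : Decidable (Spec_is_bypass_py path out) := by unfold Spec_is_bypass_py; infer_instance

-- ===== CLAIM =====
def Claim_equal_is_bypass_py : Prop := ∀ (path : String), Dom_is_bypass_py path → Spec_is_bypass_py path (is_bypass_py path)

-- ===== LEMMAS AND PROOFS =====

-- [c] is a prefix of l iff l starts with c
theorem pv_single_prefix {c : Char} {l : List Char} : [c] <+: l ↔ l.head? = some c := by
  cases l with
  | nil => simp
  | cons a t => constructor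
                · rintro ⟨r, hr⟩; simp at hr; simp [hr.1]
                · intro h; simp at h; exact ⟨t, by simp [h]⟩

-- [c] is an infix of l iff c ∈ l
theorem pv_single_infix {c : Char} {l : List Char} : [c] <:+: l ↔ c ∈ l := by
  constructor
  · intro h; exact h.subset (by simp)
  · intro h
    obtain ⟨s, t, rfl⟩ := List.append_of_mem h
    exact ⟨s, t, by simp⟩

-- characterization of first '/' position: A's prefix test = B's first-segment test
theorem pv_sw_word (w t : List Char) (hw : ('/' : Char) ∉ w) (j : ℕ)
    (hj : PySem.Chars.find t ['/'] = (j : ℤ)) :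
    ((w ++ ['/']) <+: t ↔ t.take j = w) := by
  have hnn : 0 ≤ PySem.Chars.find t ['/'] := by rw [hj]; exact_mod_cast Nat.zero_le j
  obtain ⟨hpre, hmin⟩ := PySem.Chars.find_spec hnn
  rw [hj] at hpre hmin
  simp only [Int.toNat_natCast] at hpre hmin
  have hget : t[j]? = some '/' := by
    rw [← List.head?_drop]; exact pv_single_prefix.mp hpre
  have hnone : ∀ i, i < j → t[i]? ≠ some '/' := by
    intro i hi hcontra
    exact hmin i (by exact_mod_cast hi) (pv_single_prefix.mpr (by rw [List.head?_drop]; exact hcontra))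
  constructor
  · rintro ⟨r, hr⟩
    have ht : t = w ++ '/' :: r := by rw [← hr]; simp
    subst ht
    have hjw : j = w.length := by
      rcases lt_trichotomy j w.length with h | h | h
      · exfalso
        rw [List.getElem?_append_left h] at hget
        exact hw (List.mem_of_getElem? hget)
      · exact h
      · exfalso
        exact hnone w.length h (by simp)
    rw [hjw]; simp
  · intro htake
    have hjlen : j < t.length := by
      by_contra h
      rw [List.getElem?_eq_none (by omega)] at hget
      simp at hget
    have hdrop : t.drop j = '/' :: t.drop (j+1) := by
      rw [← List.getElem_cons_drop hjlen]
      congr 1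
      have := hget
      rw [List.getElem?_eq_getElem hjlen] at this
      exact Option.some.inj this
    refine ⟨t.drop (j+1), ?_⟩
    conv_rhs => rw [← List.take_append_drop j t]
    rw [htake, hdrop]; simp

-- A's loop as a disjunction of its eight tests
theorem pv_A_or (path : String) :
    is_bypass_py path =
      (PySem.Chars.startswith path.toList "/auth/".toList
       || PySem.Chars.startswith path.toList "/admin/".toList
       || PySem.Chars.startswith path.toList "/static/".toList
       || PySem.Chars.startswith path.toList "/media/".toList
       || PySem.Chars.startswith path.toList "/conta/seguranca/mfa/".toList
       || (path == "/healthz") || (path == "/readyz") || (path == "/metrics")) := by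
  unfold is_bypass_py pvMfaBypassPaths
  have e1 : PySem.Str.endswith "/auth/" "/" = true := by decide
  have e2 : PySem.Str.endswith "/admin/" "/" = true := by decide
  have e3 : PySem.Str.endswith "/static/" "/" = true := by decide
  have e4 : PySem.Str.endswith "/media/" "/" = true := by decide
  have e5 : PySem.Str.endswith "/conta/seguranca/mfa/" "/" = true := by decide
  have e6 : PySem.Str.endswith "/healthz" "/" = false := by decide
  have e7 : PySem.Str.endswith "/readyz" "/" = false := by decide
  have e8 : PySem.Str.endswith "/metrics" "/" = false := by decide
  simp only [pvALoop, e1, e2, e3, e4, e5, e6, e7, e8, if_true,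
    PySem.Str.startswith_eq, Bool.if_true_left]
  cases PySem.Chars.startswith path.toList "/auth/".toList <;>
  cases PySem.Chars.startswith path.toList "/admin/".toList <;>
  cases PySem.Chars.startswith path.toList "/static/".toList <;>
  cases PySem.Chars.startswith path.toList "/media/".toList <;>
  cases PySem.Chars.startswith path.toList "/conta/seguranca/mfa/".toList <;>
  cases path == "/healthz" <;> cases path == "/readyz" <;> cases path == "/metrics" <;> rfl

-- String equality through ofList
theorem pv_ofList_eq (t : List Char) (s : String) :
    (String.ofList t == s) = decide (t = s.toList) := by
  by_cases h : t = s.toList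
  · subst h
    have he : String.ofList s.toList = s := by rw [← String.toList_inj, String.toList_ofList]
    simp [he]
  · have hne : String.ofList t ≠ s := fun hc => h (by rw [← hc, String.toList_ofList])
    simp [h, hne]

-- ===== VERDICT =====
theorem is_bypass_py_spec : Claim_equal_is_bypass_py := by
  intro path _
  unfold Spec_is_bypass_py
  rw [pv_A_or]
  unfold is_bypass_py_alt
  cases hl : path.toList with
  | nil =>
    have hsw : PySem.Str.startswith path "/" = false := by
      rw [PySem.Str.startswith_eq, hl]; decide
    simp only [hsw, Bool.not_false, if_true]
    have hnilsw : ∀ (c : Char) (p : List Char),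
        PySem.Chars.startswith [] (c :: p) = false := fun _ _ => rfl
    rw [show ("/auth/".toList) = '/' :: "auth/".toList from rfl, hnilsw,
        show ("/admin/".toList) = '/' :: "admin/".toList from rfl, hnilsw,
        show ("/static/".toList) = '/' :: "static/".toList from rfl, hnilsw,
        show ("/media/".toList) = '/' :: "media/".toList from rfl, hnilsw,
        show ("/conta/seguranca/mfa/".toList) = '/' :: "conta/seguranca/mfa/".toList from rfl,
        hnilsw]
    have hne : ∀ (s : String), s.toList ≠ [] → (path == s) = false := by
      intro s hs
      simp only [beq_eq_false_iff_ne, ne_eq]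
      intro hc; rw [hc] at hl; exact hs hl
    rw [hne "/healthz" (by decide), hne "/readyz" (by decide), hne "/metrics" (by decide)]
    rfl
  | cons c t =>
    by_cases hc : c = '/'
    · subst hc
      have hsw : PySem.Str.startswith path "/" = true := by
        rw [PySem.Str.startswith_eq, hl]
        exact (PySem.Chars.startswith_iff _ _).mpr ⟨t, by simp⟩
      simp only [hsw, Bool.not_true, Bool.false_eq_true, if_false]
      have hff : PySem.Str.findFrom path "/" 1 =
          (if PySem.Chars.find t ['/'] = -1 then -1 else 1 + PySem.Chars.find t ['/']) := by
        rw [PySem.Str.findFrom_eq]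
        have h1 : (1 : ℤ) = ((1 : ℕ) : ℤ) := rfl
        rw [h1, PySem.Chars.findFrom_natCast path.toList "/".toList 1 (by rw [hl]; simp)]
        rw [hl]
        rfl
      have hsw' : ∀ (w : List Char),
          PySem.Chars.startswith ('/' :: t) ('/' :: w) = decide (w <+: t) := by
        intro w
        show (('/'::w).isPrefixOf ('/'::t)) = _
        simp only [List.isPrefixOf, beq_self_eq_true, Bool.true_and]
        rw [Bool.eq_iff_iff]
        simp [List.isPrefixOf_iff_prefix]
      rcases hfind : PySem.Chars.find t ['/'] with j | j
      · -- find = j ≥ 0 : there is a '/' in t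
        have hfind' : PySem.Chars.find t ['/'] = (j : ℤ) := hfind
        have hmem : ('/' : Char) ∈ t := by
          rw [← pv_single_infix, ← PySem.Chars.find_nonneg_iff, hfind']
          exact_mod_cast Nat.zero_le j
        have hffv : PySem.Str.findFrom path "/" 1 = 1 + (j : ℤ) := by
          rw [hff, hfind', if_neg (by omega)]
        rw [hffv]
        have hne : ((1 + (j : ℤ)) == -1) = false := by
          simp only [beq_eq_false_iff_ne, ne_eq]; omega
        rw [hne, if_neg (by simp)]
        have hexact : ∀ (s : String), ('/' : Char) ∉ s.toList.tail → (path == s) = false := by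
          intro s hs
          simp only [beq_eq_false_iff_ne, ne_eq]
          intro hceq
          rw [hceq] at hl
          apply hs; rw [hl]; simpa using hmem
        rw [hexact "/healthz" (by decide), hexact "/readyz" (by decide),
            hexact "/metrics" (by decide)]
        have hslice : PySem.Str.slice path (some 1) (some (1 + (j : ℤ))) = String.ofList (t.take j) := by
          unfold PySem.Str.slice
          have h1 : (1 : ℤ) = ((1 : ℕ) : ℤ) := rfl
          have h2 : (1 + (j : ℤ)) = (((1 + j : ℕ)) : ℤ) := by push_cast; ring
          rw [h2, h1]
          unfold PySem.Chars.slice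
          rw [PySem.List.slice_natCast, hl]
          congr 1
          simp
        rw [hslice]
        have hsets : PySem.Set.contains pvPrefixSegs (String.ofList (t.take j))
            = (decide (t.take j = "auth".toList) || decide (t.take j = "admin".toList)
               || decide (t.take j = "static".toList) || decide (t.take j = "media".toList)) := by
          have hps : pvPrefixSegs = ["auth", "admin", "static", "media"] := by decide
          rw [hps]
          simp only [PySem.Set.contains, List.contains, List.elem_cons, List.elem_nil,
            pv_ofList_eq]
          cases h1 : decide (t.take j = "auth".toList) <;>
          cases h2 : decide (t.take j = "admin".toList) <;>
          cases h3 : decide (t.take j = "static".toList) <;>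
          cases h4 : decide (t.take j = "media".toList) <;> simp_all
        rw [hsets]
        have hs1 : PySem.Chars.startswith ('/' :: t) "/auth/".toList
            = decide (t.take j = "auth".toList) := by
          rw [show ("/auth/".toList) = '/' :: ("auth".toList ++ ['/']) from rfl, hsw']
          simp only [decide_eq_decide]
          exact pv_sw_word "auth".toList t (by decide) j hfind' 
        have hs2 : PySem.Chars.startswith ('/' :: t) "/admin/".toList
            = decide (t.take j = "admin".toList) := by
          rw [show ("/admin/".toList) = '/' :: ("admin".toList ++ ['/']) from rfl, hsw']
          simp only [decide_eq_decide]
          exact pv_sw_word "admin".toList t (by decide) j hfind' 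
        have hs3 : PySem.Chars.startswith ('/' :: t) "/static/".toList
            = decide (t.take j = "static".toList) := by
          rw [show ("/static/".toList) = '/' :: ("static".toList ++ ['/']) from rfl, hsw']
          simp only [decide_eq_decide]
          exact pv_sw_word "static".toList t (by decide) j hfind' 
        have hs4 : PySem.Chars.startswith ('/' :: t) "/media/".toList
            = decide (t.take j = "media".toList) := by
          rw [show ("/media/".toList) = '/' :: ("media".toList ++ ['/']) from rfl, hsw']
          simp only [decide_eq_decide]
          exact pv_sw_word "media".toList t (by decide) j hfind' 
        have hs5 : PySem.Str.startswith path pvMfaPrefix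
            = PySem.Chars.startswith ('/' :: t) "/conta/seguranca/mfa/".toList := by
          rw [PySem.Str.startswith_eq, hl]; rfl
        rw [hs1, hs2, hs3, hs4, hs5]
        cases decide (t.take j = "auth".toList) <;>
        cases decide (t.take j = "admin".toList) <;>
        cases decide (t.take j = "static".toList) <;>
        cases decide (t.take j = "media".toList) <;>
        cases PySem.Chars.startswith ('/' :: t) "/conta/seguranca/mfa/".toList <;> rfl
      · -- find = negative : no '/' in t
        have hneg : PySem.Chars.find t ['/'] = -1 := by
          have := PySem.Chars.neg_one_le_find t ['/']
          rw [hfind] at this ⊢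
          omega
        have hnomem : ('/' : Char) ∉ t := by
          rw [← pv_single_infix]
          exact (PySem.Chars.find_eq_neg_one_iff t ['/']).mp hneg
        have hffv : PySem.Str.findFrom path "/" 1 = -1 := by rw [hff, hneg]; simp
        rw [hffv]
        rw [show ((-1 : ℤ) == -1) = true from rfl, if_pos rfl]
        have hpf : ∀ (w : List Char), ('/' : Char) ∈ w →
            PySem.Chars.startswith ('/' :: t) ('/' :: w) = false := by
          intro w hwmem
          rw [hsw']
          simp only [decide_eq_false_iff_not]
          intro hcp
          exact hnomem (hcp.subset hwmem)
        rw [show ("/auth/".toList) = '/' :: "auth/".toList from rfl, hpf _ (by decide),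
            show ("/admin/".toList) = '/' :: "admin/".toList from rfl, hpf _ (by decide),
            show ("/static/".toList) = '/' :: "static/".toList from rfl, hpf _ (by decide),
            show ("/media/".toList) = '/' :: "media/".toList from rfl, hpf _ (by decide),
            show ("/conta/seguranca/mfa/".toList) = '/' :: "conta/seguranca/mfa/".toList from rfl,
            hpf _ (by decide)]
        have hslice : PySem.Str.slice path (some 1) none = String.ofList t := by
          unfold PySem.Str.slice PySem.Chars.slice
          have h1 : (1 : ℤ) = ((1 : ℕ) : ℤ) := rfl
          rw [h1, PySem.List.slice_from_natCast, hl]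
          rfl
        rw [hslice]
        have hsets : PySem.Set.contains pvExactSegs (String.ofList t)
            = (decide (t = "healthz".toList) || decide (t = "readyz".toList)
               || decide (t = "metrics".toList)) := by
          have hes : pvExactSegs = ["healthz", "readyz", "metrics"] := by decide
          rw [hes]
          simp only [PySem.Set.contains, List.contains, List.elem_cons, List.elem_nil,
            pv_ofList_eq]
          cases h1 : decide (t = "healthz".toList) <;>
          cases h2 : decide (t = "readyz".toList) <;>
          cases h3 : decide (t = "metrics".toList) <;> simp_all
        rw [hsets]
        have heq : ∀ (s : String) (u : List Char), s.toList = '/' :: u →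
            (path == s) = decide (t = u) := by
          intro s u hs
          have hiff : (path = s) ↔ (t = u) := by
            rw [← String.toList_inj, hl, hs]
            constructor
            · intro h; exact (List.cons.inj h).2
            · intro h; rw [h]
          rw [Bool.eq_iff_iff]
          simp only [beq_iff_eq, decide_eq_true_eq]
          exact hiff
        rw [heq "/healthz" "healthz".toList (by decide),
            heq "/readyz" "readyz".toList (by decide),
            heq "/metrics" "metrics".toList (by decide)]
        cases decide (t = "healthz".toList) <;>
        cases decide (t = "readyz".toList) <;>
        cases decide (t = "metrics".toList) <;> rfl
    · -- first char is not '/': everything false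
      have hpf : ∀ (w : List Char), PySem.Chars.startswith (c :: t) ('/' :: w) = false := by
        intro w
        show (('/' :: w).isPrefixOf (c :: t)) = false
        simp only [List.isPrefixOf, Bool.and_eq_false_iff, beq_eq_false_iff_ne, ne_eq]
        left
        exact fun h => hc h.symm
      have hsw : PySem.Str.startswith path "/" = false := by
        rw [PySem.Str.startswith_eq, hl]
        exact hpf []
      simp only [hsw, Bool.not_false, if_true]
      rw [show ("/auth/".toList) = '/' :: "auth/".toList from rfl, hpf,
          show ("/admin/".toList) = '/' :: "admin/".toList from rfl, hpf,
          show ("/static/".toList) = '/' :: "static/".toList from rfl, hpf,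
          show ("/media/".toList) = '/' :: "media/".toList from rfl, hpf,
          show ("/conta/seguranca/mfa/".toList) = '/' :: "conta/seguranca/mfa/".toList from rfl,
          hpf]
      have hne : ∀ (s : String), s.toList.head? = some '/' → (path == s) = false := by
        intro s hs
        simp only [beq_eq_false_iff_ne, ne_eq]
        intro hceq
        rw [hceq] at hl
        rw [hl] at hs
        simp only [List.head?_cons, Option.some.injEq] at hs
        exact hc hs
      rw [hne "/healthz" (by decide), hne "/readyz" (by decide), hne "/metrics" (by decide)]
      rfl
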